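-- pv_equiv track=rewrite | github.com/MrBrantCode/unitest_baseline | mut_generate/mist_train_cf/cf_89838/solution.py | shuffle_list
-- ===== SOURCE A (Python) =====
-- def shuffle_list(lst):
--     even_nums = []
--     odd_nums = []
--
--     # Split the list into even and odd numbers
--     for num in lst:
--         if num % 2 == 0 and num not in even_nums:
--             even_nums.append(num)
--         elif num % 2 != 0 and num not in odd_nums:
--             odd_nums.append(num)
--
--     # Concatenate the even and odd numbers
--     shuffled_list = even_nums + odd_nums
--
--     return shuffled_list
-- ===== SOURCE B (Python) =====
-- def shuffle_list(lst):
--     deduped = list(dict.fromkeys(lst))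
--     return sorted(deduped, key=lambda x: x % 2 != 0)
-- ===== Notes on version B (the rewrite author's own statement) =====
-- stated objective: faster
-- what changed: Replaced A's per-element membership scans into two hand-maintained even/odd buckets by ordered dedup via dict.fromkeys followed by a stable sort on the boolean parity key.
import Mathlib
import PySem

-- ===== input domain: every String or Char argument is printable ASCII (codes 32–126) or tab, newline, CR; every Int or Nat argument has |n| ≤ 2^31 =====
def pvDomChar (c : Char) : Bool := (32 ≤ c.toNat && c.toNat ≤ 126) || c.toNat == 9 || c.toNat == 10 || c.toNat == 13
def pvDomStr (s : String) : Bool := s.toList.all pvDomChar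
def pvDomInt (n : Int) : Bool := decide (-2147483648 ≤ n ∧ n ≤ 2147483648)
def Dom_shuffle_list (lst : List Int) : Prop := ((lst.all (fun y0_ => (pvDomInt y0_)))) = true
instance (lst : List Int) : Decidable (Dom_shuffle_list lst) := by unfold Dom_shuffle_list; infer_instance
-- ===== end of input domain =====

-- B replaces A's quadratic membership scans into two even/odd buckets by ordered dedup
-- (dict.fromkeys) followed by a stable sort on the boolean parity key; same return value, faster.

-- ===== PORT A =====
def shuffle_list (lst : List Int) : List Int :=
  let st := lst.foldl (fun (s : List Int × List Int) num =>
      if (PySem.Int.mod num 2 == 0) && !(s.1.contains num) then (s.1 ++ [num], s.2)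
      else if (PySem.Int.mod num 2 != 0) && !(s.2.contains num) then (s.1, s.2 ++ [num])
      else s)
    ([], [])
  st.1 ++ st.2

-- ===== PORT B =====
def shuffle_list_alt (lst : List Int) : List Int :=
  PySem.List.sorted (PySem.List.dedup lst) (fun x => PySem.Int.mod x 2 != 0) false

-- ===== PRECONDITION & SPEC =====
def Spec_shuffle_list (lst : List Int) (out : List Int) : Prop := out = shuffle_list_alt lst
instance (lst : List Int) (out : List Int) : Decidable (Spec_shuffle_list lst out) := by unfold Spec_shuffle_list; infer_instance

-- ===== CLAIM (what is proved, stated in full; the proofs are below) =====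
def Claim_equal_shuffle_list : Prop := ∀ (lst : List Int), Dom_shuffle_list lst → Spec_shuffle_list lst (shuffle_list lst)

-- ===== LEMMAS AND PROOFS =====

-- A's loop body equals "Set.add into the matching bucket".
lemma loopA (xs : List Int) : ∀ (e o : List Int),
    xs.foldl (fun (s : List Int × List Int) num =>
      if (PySem.Int.mod num 2 == 0) && !(s.1.contains num) then (s.1 ++ [num], s.2)
      else if (PySem.Int.mod num 2 != 0) && !(s.2.contains num) then (s.1, s.2 ++ [num])
      else s) (e, o)
    = ((xs.filter (fun x => PySem.Int.mod x 2 == 0)).foldl PySem.Set.add e,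
       (xs.filter (fun x => PySem.Int.mod x 2 != 0)).foldl PySem.Set.add o) := by
  induction xs with
  | nil => intro e o; rfl
  | cons x xs ih =>
    intro e o
    have hme : PySem.Int.mod x 2 = x % 2 := PySem.Int.mod_eq_emod_of_pos (by norm_num)
    by_cases h : PySem.Int.mod x 2 = 0
    · have hm : x % 2 = 0 := by rw [← hme]; exact h
      have hd : (2:Int) ∣ x := by omega
      have hstep : (if (PySem.Int.mod x 2 == 0) && !((e, o).1.contains x) then ((e, o).1 ++ [x], (e, o).2)
          else if (PySem.Int.mod x 2 != 0) && !((e, o).2.contains x) then ((e, o).1, (e, o).2 ++ [x])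
          else (e, o)) = (PySem.Set.add e x, o) := by
        by_cases hc : e.contains x = true <;>
          simp [PySem.Set.add, hm] <;> (try (split_ifs <;> rfl))
      have hf1 : List.filter (fun x => PySem.Int.mod x 2 == 0) (x :: xs)
          = x :: List.filter (fun x => PySem.Int.mod x 2 == 0) xs := by simp [hm]
      have hf2 : List.filter (fun x => PySem.Int.mod x 2 != 0) (x :: xs)
          = List.filter (fun x => PySem.Int.mod x 2 != 0) xs := by simp [hm]
      rw [List.foldl_cons, hstep, ih, hf1, hf2, List.foldl_cons]
    · have hm : x % 2 = 1 := by
        have h0 : ¬ x % 2 = 0 := by rw [← hme]; exact h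
        omega
      have hd : ¬ (2:Int) ∣ x := by omega
      have hstep : (if (PySem.Int.mod x 2 == 0) && !((e, o).1.contains x) then ((e, o).1 ++ [x], (e, o).2)
          else if (PySem.Int.mod x 2 != 0) && !((e, o).2.contains x) then ((e, o).1, (e, o).2 ++ [x])
          else (e, o)) = (e, PySem.Set.add o x) := by
        by_cases hc : o.contains x = true <;>
          simp [PySem.Set.add, hm] <;> (try (split_ifs <;> rfl))
      have hf1 : List.filter (fun x => PySem.Int.mod x 2 == 0) (x :: xs)
          = List.filter (fun x => PySem.Int.mod x 2 == 0) xs := by simp [hm]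
      have hf2 : List.filter (fun x => PySem.Int.mod x 2 != 0) (x :: xs)
          = x :: List.filter (fun x => PySem.Int.mod x 2 != 0) xs := by simp [hm]
      rw [List.foldl_cons, hstep, ih, hf1, hf2, List.foldl_cons]

-- dedup and filter commute (stated for foldl Set.add, i.e. Set.update).
lemma dedupFilter (p : Int → Bool) (xs : List Int) : ∀ (t : List Int),
    (xs.filter p).foldl PySem.Set.add (t.filter p) = (xs.foldl PySem.Set.add t).filter p := by
  induction xs with
  | nil => intro t; rfl
  | cons x xs ih =>
    intro t
    by_cases hp : p x = true
    · have hadd : PySem.Set.add (t.filter p) x = (PySem.Set.add t x).filter p := by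
        by_cases hx : x ∈ t <;> simp [PySem.Set.add, hx, hp, List.filter_append]
      simp only [List.filter_cons, hp, if_pos, List.foldl_cons, hadd]
      exact ih (PySem.Set.add t x)
    · have hp' : p x = false := by simpa using hp
      have hadd : (PySem.Set.add t x).filter p = t.filter p := by
        by_cases hx : x ∈ t <;> simp [PySem.Set.add, hx, List.filter_append, hp']
      rw [show List.filter p (x :: xs) = List.filter p xs from by simp [hp'],
          List.foldl_cons, ← ih (PySem.Set.add t x), hadd]

-- insertion point of x into a block list: after all "before = false", before the "true" block
lemma insertBy_block (bef : Int → Int → Bool) (x : Int) (e : List Int) : ∀ (o : List Int),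
    (∀ y ∈ e, bef x y = false) → (∀ y ∈ o, bef x y = true) →
    PySem.List.insertBy bef x (e ++ o) = e ++ x :: o := by
  induction e with
  | nil =>
    intro o _ ho
    cases o with
    | nil => rfl
    | cons y o' => simp [PySem.List.insertBy, ho y (by simp)]
  | cons z e' ih =>
    intro o he ho
    have hz : bef x z = false := he z (by simp)
    simp [PySem.List.insertBy, hz, ih o (fun y hy => he y (by simp [hy])) ho]

-- a stable sort on a boolean key is "falses then trues", each in original order
lemma sortBool (k : Int → Bool) (xs : List Int) : ∀ (e o : List Int),
    (∀ y ∈ e, k y = false) → (∀ y ∈ o, k y = true) →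
    xs.foldl (fun acc x => PySem.List.insertBy (fun a b => decide (k a < k b)) x acc) (e ++ o)
    = (e ++ xs.filter (fun x => !k x)) ++ (o ++ xs.filter k) := by
  induction xs with
  | nil => intro e o _ _; simp
  | cons x xs ih =>
    intro e o he ho
    by_cases hk : k x = true
    · have hins : PySem.List.insertBy (fun a b => decide (k a < k b)) x (e ++ o) = (e ++ o) ++ [x] := by
        apply PySem.List.insertBy_of_forall_not_before
        intro y hy
        rcases List.mem_append.mp hy with h | h
        · simp [he y h, hk]
        · simp [ho y h, hk]
      have := ih e (o ++ [x]) he (by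
        intro y hy; rcases List.mem_append.mp hy with h | h
        · exact ho y h
        · simp at h; simpa [h] using hk)
      simp only [List.foldl_cons, hins, List.append_assoc, List.singleton_append] at this ⊢
      rw [this]
      simp [hk]
    · have hk' : k x = false := by simpa using hk
      have hins : PySem.List.insertBy (fun a b => decide (k a < k b)) x (e ++ o) = e ++ x :: o := by
        apply insertBy_block
        · intro y hy; simp [he y hy, hk']
        · intro y hy; simp [ho y hy, hk']
      have := ih (e ++ [x]) o (by
        intro y hy; rcases List.mem_append.mp hy with h | h
        · exact he y h
        · simp at h; simpa [h] using hk') ho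
      simp only [List.foldl_cons, hins]
      have hrw : e ++ x :: o = (e ++ [x]) ++ o := by simp
      rw [hrw, this]
      simp [hk']

-- ===== VERDICT (by name: the statement is the Claim_ definition above) =====
theorem shuffle_list_spec : Claim_equal_shuffle_list := by
  intro lst _
  show shuffle_list lst = shuffle_list_alt lst
  have hA : shuffle_list lst =
      (lst.foldl PySem.Set.add []).filter (fun x => PySem.Int.mod x 2 == 0) ++
      (lst.foldl PySem.Set.add []).filter (fun x => PySem.Int.mod x 2 != 0) := by
    unfold shuffle_list
    rw [loopA lst [] []]
    have he := dedupFilter (fun x => PySem.Int.mod x 2 == 0) lst []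
    have ho := dedupFilter (fun x => PySem.Int.mod x 2 != 0) lst []
    simp only [List.filter_nil] at he ho
    simp only [he, ho]
  have hB : shuffle_list_alt lst =
      (lst.foldl PySem.Set.add []).filter (fun x => PySem.Int.mod x 2 == 0) ++
      (lst.foldl PySem.Set.add []).filter (fun x => PySem.Int.mod x 2 != 0) := by
    unfold shuffle_list_alt
    rw [PySem.List.sorted_eq_foldl_insertBy]
    have hs := sortBool (fun x => PySem.Int.mod x 2 != 0) (PySem.List.dedup lst) [] []
      (by intro y h; simp at h) (by intro y h; simp at h)
    simp only [List.nil_append, List.append_nil] at hs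
    rw [hs]
    have hkey : (fun x => !(PySem.Int.mod x 2 != 0)) = (fun x => PySem.Int.mod x 2 == 0) := by
      funext x; simp [bne]
    rw [hkey, PySem.List.dedup_eq_ofList, PySem.Set.ofList_eq_foldl]
  rw [hA, hB]
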